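-- pv_equiv track=rewrite | github.com/milselarch/50.004 | hackerrank/biggest_string.py | match_array
-- ===== SOURCE A (Python) =====
-- def string_cmp(a, b):
--     """
--     returns longest
--     """
--     match_length = 0
--     search_length = min(len(a), len(b))
--
--     for k in range(search_length):
--         if a[k] == b[k]:
--             match_length += 1
--         else:
--             break
--
--     return match_length
--
-- def match_array(a, b):
--     """
--     generate a 2D array c
--     where c[k][i] represents the length of the longest starting
--     substring that is shared between a[:k] and b[:i] that is
--     at the start of both strings
--     xkhopxlktk pdwohjlzjk
--     """
--     match_counts = []
--
--     for k in range(len(a)):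
--         match_row = []
--
--         for i in range(len(b)):
--             a_substr = a[k:]
--             b_substr = b[i:]
--
--             max_match_length = string_cmp(a_substr, b_substr)
--             match_row.append(max_match_length)
--
--         match_counts.append(match_row)
--
--     return match_counts
-- ===== SOURCE B (Python) =====
-- def match_array(a, b):
--     """
--     Same table as A, computed bottom-up in O(len(a)*len(b)):
--     row k is derived from row k+1 via c[k][i] = 1 + c[k+1][i+1] if a[k] == b[i] else 0.
--     """
--     m = len(b)
--     rows = []
--     below = [0] * (m + 1)  # row k+1 extended with a 0 sentinel
--     for k in range(len(a) - 1, -1, -1):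
--         ak = a[k]
--         row = [1 + below[i + 1] if ak == b[i] else 0 for i in range(m)]
--         rows.append(row)
--         below = row + [0]
--     rows.reverse()
--     return rows
-- ===== Notes on version B (the rewrite author's own statement) =====
-- stated objective: faster
-- what changed: Replaces the per-cell suffix rescan (string_cmp on every pair of suffixes) by a bottom-up dynamic program that derives row k from row k+1 via c[k][i] = 1 + c[k+1][i+1] when a[k]==b[i], else 0.
import Mathlib
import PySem

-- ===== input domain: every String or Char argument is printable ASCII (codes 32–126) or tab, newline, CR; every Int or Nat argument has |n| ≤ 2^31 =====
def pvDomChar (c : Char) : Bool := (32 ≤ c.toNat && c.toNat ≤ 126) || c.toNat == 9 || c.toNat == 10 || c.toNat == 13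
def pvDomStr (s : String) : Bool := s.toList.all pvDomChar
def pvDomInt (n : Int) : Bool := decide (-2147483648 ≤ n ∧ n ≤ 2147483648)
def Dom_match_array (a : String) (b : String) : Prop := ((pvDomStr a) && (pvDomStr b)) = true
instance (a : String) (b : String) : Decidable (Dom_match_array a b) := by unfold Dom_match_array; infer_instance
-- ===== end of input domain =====

-- B replaces A's per-cell suffix rescan by the bottom-up DP c[k][i] = 1 + c[k+1][i+1] if a[k]==b[i] else 0 (asymptotically faster).

-- ===== PORT A =====
-- string_cmp: walk index k over both strings, count matches, break at first mismatch or end.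
def stringCmp : List Char → List Char → Int
  | x :: xs, y :: ys => if x = y then 1 + stringCmp xs ys else 0
  | _, _ => 0

-- for k in range(len(a)): for i in range(len(b)): string_cmp(a[k:], b[i:])
def match_array (a : String) (b : String) : List (List Int) :=
  (PySem.List.pyRange 0 (a.toList.length : Int) 1).map (fun k =>
    (PySem.List.pyRange 0 (b.toList.length : Int) 1).map (fun i =>
      stringCmp (PySem.List.slice a.toList (some k) none)
                (PySem.List.slice b.toList (some i) none)))

-- ===== PORT B =====
-- one DP row: entry i is 1 + below[i+1] if x == b[i] else 0; Python's 0-sentinel 'row + [0]' is realized by headD 0.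
def altRow (x : Char) : List Char → List Int → List Int
  | y :: ys, bel => (if x = y then 1 + bel.tail.headD 0 else 0) :: altRow x ys bel.tail
  | [], _ => []

-- rows built bottom-up (Python's reversed loop + final reverse = this structural recursion over a)
def altRows (b : List Char) : List Char → List (List Int)
  | [] => []
  | x :: xs => altRow x b ((altRows b xs).headD []) :: altRows b xs

def match_array_alt (a : String) (b : String) : List (List Int) :=
  altRows b.toList a.toList

-- ===== PRECONDITION & SPEC =====
def Spec_match_array (a : String) (b : String) (out : List (List Int)) : Prop := out = match_array_alt a b
instance (a : String) (b : String) (out : List (List Int)) : Decidable (Spec_match_array a b out) := by unfold Spec_match_array; infer_instance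

-- ===== CLAIM (what is proved, stated in full; the proofs are below) =====
def Claim_equal_match_array : Prop := ∀ (a : String) (b : String), Dom_match_array a b → Spec_match_array a b (match_array a b)

-- ===== LEMMAS AND PROOFS =====

-- A's row k, as a function of the suffix as = a[k:]: entries string_cmp(as, b[i:]) for i = 0..len b - 1
def rowOf (as : List Char) : List Char → List Int
  | [] => []
  | y :: ys => stringCmp as (y :: ys) :: rowOf as ys

lemma stringCmp_nil (as : List Char) : stringCmp as [] = 0 := by
  cases as <;> simp [stringCmp]

lemma headD_rowOf (as ys : List Char) : (rowOf as ys).headD 0 = stringCmp as ys := by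
  cases ys <;> simp [rowOf, stringCmp_nil]

lemma altRow_rowOf (x : Char) (xs : List Char) :
    ∀ b : List Char, altRow x b (rowOf xs b) = rowOf (x :: xs) b := by
  intro b
  induction b with
  | nil => rfl
  | cons y ys ih =>
      simp only [rowOf, altRow, List.tail_cons, headD_rowOf, stringCmp, ih]

lemma altRow_nil (x : Char) : ∀ b : List Char, altRow x b [] = rowOf [x] b := by
  intro b
  induction b with
  | nil => rfl
  | cons y ys ih =>
      simp only [rowOf, altRow, List.tail_nil, List.headD_nil, stringCmp, ih]

-- all of A's rows, indexed by the suffixes of a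
def rowsOf (b : List Char) : List Char → List (List Int)
  | [] => []
  | x :: xs => rowOf (x :: xs) b :: rowsOf b xs

lemma altRows_eq_rowsOf (b : List Char) : ∀ as : List Char, altRows b as = rowsOf b as := by
  intro as
  induction as with
  | nil => rfl
  | cons x xs ih =>
      cases xs with
      | nil => simp [altRows, rowsOf, altRow_nil]
      | cons x' xs' =>
          simp only [altRows] at ih ⊢
          rw [ih]
          simp only [List.headD_cons, rowsOf]
          rw [altRow_rowOf]

lemma range_map_stringCmp (as : List Char) :
    ∀ bl : List Char, (List.range bl.length).map (fun k => stringCmp as (bl.drop k)) = rowOf as bl := by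
  intro bl
  induction bl with
  | nil => rfl
  | cons y ys ih =>
      rw [List.length_cons, List.range_succ_eq_map, List.map_cons, List.map_map]
      simpa [rowOf, Function.comp] using ih

lemma range_map_rowOf (bl : List Char) :
    ∀ al : List Char, (List.range al.length).map (fun k => rowOf (al.drop k) bl) = rowsOf bl al := by
  intro al
  induction al with
  | nil => rfl
  | cons x xs ih =>
      rw [List.length_cons, List.range_succ_eq_map, List.map_cons, List.map_map]
      simpa [rowsOf, Function.comp] using ih

lemma pyRange_map_slice {γ : Type} (xs : List Char) (f : List Char → γ) :
    (PySem.List.pyRange 0 (xs.length : Int) 1).map (fun i => f (PySem.List.slice xs (some i) none)) =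
      (List.range xs.length).map (fun k => f (xs.drop k)) := by
  rw [PySem.List.pyRange_one, List.map_map]
  apply List.map_congr_left
  intro k hk
  simp [PySem.List.slice_from_natCast]

-- ===== VERDICT (by name: the statement is the Claim_ definition above) =====
theorem match_array_spec : Claim_equal_match_array := by
  intro a b _
  unfold Spec_match_array match_array match_array_alt
  rw [altRows_eq_rowsOf, ← range_map_rowOf b.toList a.toList]
  rw [pyRange_map_slice a.toList (fun as =>
        (PySem.List.pyRange 0 (b.toList.length : Int) 1).map (fun i =>
          stringCmp as (PySem.List.slice b.toList (some i) none)))]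
  apply List.map_congr_left
  intro k hk
  rw [pyRange_map_slice b.toList (stringCmp (a.toList.drop k)), range_map_stringCmp]
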